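-- pv_equiv track=rewrite | github.com/DMontgomery40/football-tactical-workbench | backend/app/wide_angle.py | _matching_class_ids
-- ===== SOURCE A (Python) =====
-- from typing import Any
--
-- def _normalize_class_name(value: Any) -> str:
--     return " ".join(str(value or "").strip().lower().replace("_", " ").replace("-", " ").split())
--
-- def _matching_class_ids(names: dict[int, str], hints: tuple[str, ...]) -> list[int]:
--     hint_set = {_normalize_class_name(hint) for hint in hints}
--     matched_ids: list[int] = []
--     for class_id, label in names.items():
--         normalized = _normalize_class_name(label)
--         if not normalized:
--             continue
--         tokens = set(normalized.split())
--         if normalized in hint_set or tokens.intersection(hint_set):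
--             matched_ids.append(int(class_id))
--     return sorted(set(matched_ids))
-- ===== SOURCE B (Python) =====
-- def _normalize_class_name(value):
--     return " ".join(str(value or "").strip().lower().replace("_", " ").replace("-", " ").split())
--
-- def _matching_class_ids(names: dict, hints: tuple) -> list:
--     # Inverted index: map each normalized label and each of its tokens to the ids
--     # carrying it, then query the index once per hint.
--     index: dict = {}
--     for class_id, label in names.items():
--         normalized = _normalize_class_name(label)
--         if not normalized:
--             continue
--         for key in [normalized, *normalized.split()]:
--             index.setdefault(key, set()).add(int(class_id))
--     matched: set = set()
--     for hint in hints: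
--         matched |= index.get(_normalize_class_name(hint), set())
--     return sorted(matched)
-- ===== Notes on version B (the rewrite author's own statement) =====
-- stated objective: alternative
-- what changed: B builds an inverted index from each normalized label and its tokens to class ids in one pass, then queries that index per normalized hint, instead of testing every label against the hint set with per-label set intersections.
import Mathlib
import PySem

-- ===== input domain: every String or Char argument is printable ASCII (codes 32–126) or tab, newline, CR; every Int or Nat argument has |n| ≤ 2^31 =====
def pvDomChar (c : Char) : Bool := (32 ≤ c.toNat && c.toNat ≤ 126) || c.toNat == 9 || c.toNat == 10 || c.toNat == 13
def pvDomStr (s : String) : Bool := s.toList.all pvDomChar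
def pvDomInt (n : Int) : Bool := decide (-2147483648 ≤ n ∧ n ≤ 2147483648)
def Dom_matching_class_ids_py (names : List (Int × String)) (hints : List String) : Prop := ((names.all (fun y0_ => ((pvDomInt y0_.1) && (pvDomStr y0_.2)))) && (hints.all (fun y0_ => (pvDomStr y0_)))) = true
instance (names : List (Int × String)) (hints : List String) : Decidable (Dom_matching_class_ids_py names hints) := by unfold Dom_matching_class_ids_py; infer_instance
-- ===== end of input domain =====

-- B replaces the per-label scan against the hint set by an inverted index from
-- normalized labels/tokens to ids, queried once per hint (objective: alternative).

-- ===== PORT A =====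
-- _normalize_class_name (shared module helper): " ".join(str(value or "").strip().lower().replace("_"," ").replace("-"," ").split())
def pvNorm (s : String) : String :=
  PySem.Str.join " " (PySem.Str.split₀
    (PySem.Str.replace (PySem.Str.replace
      (PySem.Str.lower (PySem.Str.strip (if s == "" then "" else s))) "_" " ") "-" " "))

def matching_class_ids_py (names : List (Int × String)) (hints : List String) : List Int :=
  let hint_set : PySem.Set String := PySem.Set.ofList (hints.map pvNorm)
  let matched : List Int := (PySem.Dict.ofList names).items.foldl
    (fun acc p =>
      let normalized := pvNorm p.2
      if normalized == "" then acc
      else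
        let tokens : PySem.Set String := PySem.Set.ofList (PySem.Str.split₀ normalized)
        if PySem.Set.contains hint_set normalized || !(PySem.Set.inter tokens hint_set).isEmpty
        then acc ++ [p.1] else acc) []
  PySem.List.sorted (PySem.Set.ofList matched) (fun x => x) false

-- ===== PORT B =====
def matching_class_ids_py_alt (names : List (Int × String)) (hints : List String) : List Int :=
  let index : PySem.Dict String (PySem.Set Int) := (PySem.Dict.ofList names).items.foldl
    (fun d p =>
      let normalized := pvNorm p.2
      if normalized == "" then d
      else (normalized :: PySem.Str.split₀ normalized).foldl
        (fun d key => d.modify key PySem.Set.empty (fun s => PySem.Set.add s p.1)) d)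
    PySem.Dict.empty
  let matched : PySem.Set Int := hints.foldl
    (fun acc h => PySem.Set.union acc (index.getD (pvNorm h) PySem.Set.empty))
    PySem.Set.empty
  PySem.List.sorted matched (fun x => x) false

-- ===== PRECONDITION & SPEC =====
def Spec_matching_class_ids_py (names : List (Int × String)) (hints : List String) (out : List Int) : Prop := out = matching_class_ids_py_alt names hints
instance (names : List (Int × String)) (hints : List String) (out : List Int) : Decidable (Spec_matching_class_ids_py names hints out) := by unfold Spec_matching_class_ids_py; infer_instance

-- ===== CLAIM (what is proved, stated in full; the proofs are below) =====
def Claim_equal_matching_class_ids_py : Prop := ∀ (names : List (Int × String)) (hints : List String), Dom_matching_class_ids_py names hints → Spec_matching_class_ids_py names hints (matching_class_ids_py names hints)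

-- ===== LEMMAS AND PROOFS =====

-- A's match condition, as a proposition
theorem condA_iff (hs : PySem.Set String) (n : String) :
    (PySem.Set.contains hs n
      || !(PySem.Set.inter (PySem.Set.ofList (PySem.Str.split₀ n)) hs).isEmpty) = true
    ↔ (n ∈ hs ∨ ∃ t ∈ PySem.Str.split₀ n, t ∈ hs) := by
  simp [PySem.Set.mem_inter, PySem.Set.mem_ofList, List.eq_nil_iff_forall_not_mem]

-- membership in A's accumulated match list
theorem memA (items : List (Int × String)) (hs : PySem.Set String) (acc : List Int) (x : Int) :
    x ∈ items.foldl
      (fun acc p =>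
        let normalized := pvNorm p.2
        if normalized == "" then acc
        else
          let tokens : PySem.Set String := PySem.Set.ofList (PySem.Str.split₀ normalized)
          if PySem.Set.contains hs normalized || !(PySem.Set.inter tokens hs).isEmpty
          then acc ++ [p.1] else acc) acc
    ↔ x ∈ acc ∨ ∃ p ∈ items, x = p.1 ∧ pvNorm p.2 ≠ "" ∧
        (pvNorm p.2 ∈ hs ∨ ∃ t ∈ PySem.Str.split₀ (pvNorm p.2), t ∈ hs) := by
  induction items generalizing acc with
  | nil =>
    rw [List.foldl_nil]
    constructor
    · exact Or.inl
    · rintro (h | ⟨p, hp, _⟩)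
      · exact h
      · exact absurd hp (List.not_mem_nil)
  | cons q rest ih =>
    rw [List.foldl_cons]
    by_cases hn : pvNorm q.2 = ""
    · rw [if_pos (beq_iff_eq.mpr hn), ih]
      simp only [List.mem_cons]
      constructor
      · rintro (h | ⟨p, hp, hx, hn2, hk⟩)
        · exact Or.inl h
        · exact Or.inr ⟨p, Or.inr hp, hx, hn2, hk⟩
      · rintro (h | ⟨p, (rfl | hp), hx, hn2, hk⟩)
        · exact Or.inl h
        · exact absurd hn hn2
        · exact Or.inr ⟨p, hp, hx, hn2, hk⟩
    · rw [if_neg (fun h => hn (beq_iff_eq.mp h))]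
      by_cases hc : pvNorm q.2 ∈ hs ∨ ∃ t ∈ PySem.Str.split₀ (pvNorm q.2), t ∈ hs
      · rw [if_pos ((condA_iff hs (pvNorm q.2)).mpr hc), ih]
        simp only [List.mem_cons, List.mem_append, List.not_mem_nil, or_false]
        constructor
        · rintro ((h | hx) | ⟨p, hp, hx, hn2, hk⟩)
          · exact Or.inl h
          · exact Or.inr ⟨q, Or.inl rfl, hx, hn, hc⟩
          · exact Or.inr ⟨p, Or.inr hp, hx, hn2, hk⟩
        · rintro (h | ⟨p, (rfl | hp), hx, hn2, hk⟩)
          · exact Or.inl (Or.inl h)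
          · exact Or.inl (Or.inr hx)
          · exact Or.inr ⟨p, hp, hx, hn2, hk⟩
      · rw [if_neg (fun h => hc ((condA_iff hs (pvNorm q.2)).mp h)), ih]
        simp only [List.mem_cons]
        constructor
        · rintro (h | ⟨p, hp, hx, hn2, hk⟩)
          · exact Or.inl h
          · exact Or.inr ⟨p, Or.inr hp, hx, hn2, hk⟩
        · rintro (h | ⟨p, (rfl | hp), hx, hn2, hk⟩)
          · exact Or.inl h
          · exact absurd hk hc
          · exact Or.inr ⟨p, hp, hx, hn2, hk⟩

-- one item's inner key loop in B's index build
theorem memB_inner (keys : List String) (i : Int) (d : PySem.Dict String (PySem.Set Int))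
    (k : String) (x : Int) :
    x ∈ (keys.foldl (fun d key => d.modify key PySem.Set.empty (fun s => PySem.Set.add s i)) d).getD k PySem.Set.empty
    ↔ x ∈ d.getD k PySem.Set.empty ∨ (k ∈ keys ∧ x = i) := by
  induction keys generalizing d with
  | nil => simp
  | cons key rest ih =>
    simp only [List.foldl_cons]
    rw [ih, PySem.Dict.getD_modify]
    by_cases hk : k = key
    · subst hk; simp [PySem.Set.mem_add]; tauto
    · simp [hk]

-- membership in B's index
theorem memB_index (items : List (Int × String)) (d : PySem.Dict String (PySem.Set Int))
    (k : String) (x : Int) :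
    x ∈ (items.foldl
      (fun d p =>
        let normalized := pvNorm p.2
        if normalized == "" then d
        else (normalized :: PySem.Str.split₀ normalized).foldl
          (fun d key => d.modify key PySem.Set.empty (fun s => PySem.Set.add s p.1)) d) d).getD k PySem.Set.empty
    ↔ x ∈ d.getD k PySem.Set.empty ∨ ∃ p ∈ items, x = p.1 ∧ pvNorm p.2 ≠ "" ∧
        (k = pvNorm p.2 ∨ k ∈ PySem.Str.split₀ (pvNorm p.2)) := by
  induction items generalizing d with
  | nil =>
    rw [List.foldl_nil]
    constructor
    · exact Or.inl
    · rintro (h | ⟨p, hp, _⟩)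
      · exact h
      · exact absurd hp (List.not_mem_nil)
  | cons q rest ih =>
    rw [List.foldl_cons]
    by_cases hn : pvNorm q.2 = ""
    · rw [if_pos (beq_iff_eq.mpr hn), ih]
      simp only [List.mem_cons]
      constructor
      · rintro (h | ⟨p, hp, hx, hn2, hk⟩)
        · exact Or.inl h
        · exact Or.inr ⟨p, Or.inr hp, hx, hn2, hk⟩
      · rintro (h | ⟨p, (rfl | hp), hx, hn2, hk⟩)
        · exact Or.inl h
        · exact absurd hn hn2
        · exact Or.inr ⟨p, hp, hx, hn2, hk⟩
    · rw [if_neg (fun h => hn (beq_iff_eq.mp h))]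
      rw [ih, memB_inner]
      simp only [List.mem_cons]
      constructor
      · rintro ((h | ⟨hk, hx⟩) | ⟨p, hp, hx, hn2, hk⟩)
        · exact Or.inl h
        · exact Or.inr ⟨q, Or.inl rfl, hx, hn, by simpa using hk⟩
        · exact Or.inr ⟨p, Or.inr hp, hx, hn2, hk⟩
      · rintro (h | ⟨p, (rfl | hp), hx, hn2, hk⟩)
        · exact Or.inl (Or.inl h)
        · exact Or.inl (Or.inr ⟨by simpa using hk, hx⟩)
        · exact Or.inr ⟨p, hp, hx, hn2, hk⟩

-- B's matched-set loop: membership and nodup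
theorem memB_matched (hints : List String) (index : PySem.Dict String (PySem.Set Int))
    (acc : PySem.Set Int) (x : Int) :
    x ∈ hints.foldl (fun acc h => PySem.Set.union acc (index.getD (pvNorm h) PySem.Set.empty)) acc
    ↔ x ∈ acc ∨ ∃ h ∈ hints, x ∈ index.getD (pvNorm h) PySem.Set.empty := by
  induction hints generalizing acc with
  | nil =>
    rw [List.foldl_nil]
    constructor
    · exact Or.inl
    · rintro (h | ⟨g, hg, _⟩)
      · exact h
      · exact absurd hg (List.not_mem_nil)
  | cons h rest ih =>
    rw [List.foldl_cons, ih]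
    simp only [PySem.Set.mem_union, List.mem_cons]
    constructor
    · rintro ((hx | hx) | ⟨g, hg, hx⟩)
      · exact Or.inl hx
      · exact Or.inr ⟨h, Or.inl rfl, hx⟩
      · exact Or.inr ⟨g, Or.inr hg, hx⟩
    · rintro (hx | ⟨g, (rfl | hg), hx⟩)
      · exact Or.inl (Or.inl hx)
      · exact Or.inl (Or.inr hx)
      · exact Or.inr ⟨g, hg, hx⟩

theorem nodupB_matched (hints : List String) (index : PySem.Dict String (PySem.Set Int))
    (acc : PySem.Set Int) (hacc : acc.Nodup) :
    (hints.foldl (fun acc h => PySem.Set.union acc (index.getD (pvNorm h) PySem.Set.empty)) acc).Nodup := by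
  induction hints generalizing acc with
  | nil => exact hacc
  | cons h rest ih =>
    rw [List.foldl_cons]
    exact ih _ (PySem.Set.nodup_union _ _ hacc)

-- ===== VERDICT (by name: the statement is the Claim_ definition above) =====
-- the two match conditions pick out the same ids
theorem bridge (items : List (Int × String)) (hints : List String) (x : Int) :
    (∃ p ∈ items, x = p.1 ∧ pvNorm p.2 ≠ "" ∧
        (pvNorm p.2 ∈ PySem.Set.ofList (hints.map pvNorm) ∨
          ∃ t ∈ PySem.Str.split₀ (pvNorm p.2), t ∈ PySem.Set.ofList (hints.map pvNorm)))
    ↔ ∃ h ∈ hints, ∃ p ∈ items, x = p.1 ∧ pvNorm p.2 ≠ "" ∧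
        (pvNorm h = pvNorm p.2 ∨ pvNorm h ∈ PySem.Str.split₀ (pvNorm p.2)) := by
  constructor
  · rintro ⟨p, hp, hx, hn, (hin | ⟨t, ht, hin⟩)⟩
    · obtain ⟨h, hh, he⟩ := List.mem_map.mp ((PySem.Set.mem_ofList _ _).mp hin)
      exact ⟨h, hh, p, hp, hx, hn, Or.inl he⟩
    · obtain ⟨h, hh, he⟩ := List.mem_map.mp ((PySem.Set.mem_ofList _ _).mp hin)
      subst he
      exact ⟨h, hh, p, hp, hx, hn, Or.inr ht⟩
  · rintro ⟨h, hh, p, hp, hx, hn, (he | ht)⟩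
    · refine ⟨p, hp, hx, hn, Or.inl ?_⟩
      rw [← he]
      exact (PySem.Set.mem_ofList _ _).mpr (List.mem_map_of_mem hh)
    · exact ⟨p, hp, hx, hn,
        Or.inr ⟨pvNorm h, ht, (PySem.Set.mem_ofList _ _).mpr (List.mem_map_of_mem hh)⟩⟩

-- A = B over an arbitrary items list
theorem master (items : List (Int × String)) (hints : List String) :
    PySem.List.sorted (PySem.Set.ofList (items.foldl
      (fun acc p =>
        let normalized := pvNorm p.2
        if normalized == "" then acc
        else
          let tokens : PySem.Set String := PySem.Set.ofList (PySem.Str.split₀ normalized)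
          if PySem.Set.contains (PySem.Set.ofList (hints.map pvNorm)) normalized
              || !(PySem.Set.inter tokens (PySem.Set.ofList (hints.map pvNorm))).isEmpty
          then acc ++ [p.1] else acc) [])) (fun x => x) false
    = PySem.List.sorted (hints.foldl
        (fun acc h => PySem.Set.union acc
          ((items.foldl
            (fun d p =>
              let normalized := pvNorm p.2
              if normalized == "" then d
              else (normalized :: PySem.Str.split₀ normalized).foldl
                (fun d key => d.modify key PySem.Set.empty (fun s => PySem.Set.add s p.1)) d)
            PySem.Dict.empty).getD (pvNorm h) PySem.Set.empty))
        PySem.Set.empty) (fun x => x) false := by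
  refine PySem.List.sorted_eq_sorted_of_perm _ _ _ (fun a b h => h)
    ((List.perm_ext_iff_of_nodup (PySem.Set.nodup_ofList _)
      (nodupB_matched _ _ _ List.nodup_nil)).mpr ?_)
  intro x
  refine Iff.trans (PySem.Set.mem_ofList _ _) ?_
  refine Iff.trans (memA items (PySem.Set.ofList (hints.map pvNorm)) [] x) ?_
  refine Iff.trans (or_iff_right List.not_mem_nil) ?_
  refine Iff.trans (bridge items hints x) ?_
  refine Iff.symm ?_
  refine Iff.trans (memB_matched hints _ PySem.Set.empty x) ?_
  refine Iff.trans (or_iff_right List.not_mem_nil) ?_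
  refine exists_congr fun h => and_congr_right fun _ => ?_
  refine Iff.trans (memB_index items PySem.Dict.empty (pvNorm h) x) ?_
  exact or_iff_right (by rw [PySem.Dict.getD_empty]; exact List.not_mem_nil)

-- ===== VERDICT (by name: the statement is the Claim_ definition above) =====
theorem matching_class_ids_py_spec : Claim_equal_matching_class_ids_py := by
  intro names hints _
  show matching_class_ids_py names hints = matching_class_ids_py_alt names hints
  exact master (PySem.Dict.ofList names).items hints
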